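-- pv_equiv track=rewrite | github.com/sochdb/sochdb | sochdb-bench/h2o-bench/h2o_bench.py | _sochdb_groupby_q8
-- ===== SOURCE A (Python) =====
-- def _sochdb_groupby_q8(id6, v3, n):
--     m = {}
--     for i in range(n):
--         k = id6[i]
--         if k not in m:
--             m[k] = []
--         e = m[k]
--         e.append(v3[i])
--         if len(e) > 3:
--             e.sort(reverse=True)
--             del e[2:]
--     total = sum(min(len(v), 2) for v in m.values())
--     return total, 2
-- ===== SOURCE B (Python) =====
-- def _sochdb_groupby_q8(id6, v3, n):
--     counts = {}
--     for k in id6[:max(0, n)]: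
--         counts[k] = counts.get(k, 0) + 1
--     return sum(min(c, 2) for c in counts.values()), 2
-- ===== Notes on version B (the rewrite author's own statement) =====
-- stated objective: simpler
-- what changed: A simulates a top-2 groupby by keeping a per-key list that it appends to, reverse-sorts and truncates inside an index loop over both arrays; B just counts key occurrences in the prefix id6[:n] with a plain counter dict and sums min(count,2) at the end, never touching v3.
import Mathlib
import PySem

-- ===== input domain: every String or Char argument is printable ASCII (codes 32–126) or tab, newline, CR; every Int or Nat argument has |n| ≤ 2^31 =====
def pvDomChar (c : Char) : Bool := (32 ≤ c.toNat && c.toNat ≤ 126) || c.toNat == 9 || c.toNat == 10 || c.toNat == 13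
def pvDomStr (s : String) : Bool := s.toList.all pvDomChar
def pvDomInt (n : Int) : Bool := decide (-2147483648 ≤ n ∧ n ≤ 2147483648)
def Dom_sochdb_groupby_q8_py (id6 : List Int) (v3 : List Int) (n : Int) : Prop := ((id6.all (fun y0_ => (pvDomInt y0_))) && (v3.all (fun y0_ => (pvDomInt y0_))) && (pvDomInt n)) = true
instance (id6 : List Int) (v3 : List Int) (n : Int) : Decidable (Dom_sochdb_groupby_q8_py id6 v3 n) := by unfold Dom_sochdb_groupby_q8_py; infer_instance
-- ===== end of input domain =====

-- B replaces A's per-key top-2 list machinery (append, reverse-sort, truncate) by a plain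
-- occurrence counter over the key prefix and a final clamped sum; objective: simpler.

-- ===== PORT A =====
-- loop body of A: conditional key initialisation, append v, cap the list via reverse sort + del e[2:]
def pvStepA (d : PySem.Dict Int (List Int)) (k v : Int) : PySem.Dict Int (List Int) :=
  let d' := if d.contains k then d else d.insert k ([] : List Int)
  let e := d'.getD k []
  let e := e ++ [v]
  let e := if 3 < e.length then (PySem.List.sorted e (fun x => x) true).take 2 else e
  d'.insert k e

def sochdb_groupby_q8_py (id6 : List Int) (v3 : List Int) (n : Int) : Int × Int :=
  -- id6[i] / v3[i] via pyGetD: in range on every input admitted by Pre_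
  let m := (PySem.List.pyRange 0 n 1).foldl
      (fun m i => pvStepA m (PySem.List.pyGetD id6 i 0) (PySem.List.pyGetD v3 i 0))
      PySem.Dict.empty
  (m.values.foldl (fun s v => s + min (v.length : Int) 2) 0, 2)

-- ===== PORT B =====
def sochdb_groupby_q8_py_alt (id6 : List Int) (v3 : List Int) (n : Int) : Int × Int :=
  let keys := PySem.List.slice id6 none (some (max 0 n))
  let counts := keys.foldl (fun d k => d.insert k (d.getD k 0 + 1)) PySem.Dict.empty
  (counts.values.foldl (fun s c => s + min c 2) 0, 2)

-- ===== PRECONDITION & SPEC =====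
-- Pre_ excludes exactly the inputs where A raises IndexError (n beyond either list's length)
def Pre_sochdb_groupby_q8_py (id6 : List Int) (v3 : List Int) (n : Int) : Prop :=
  n ≤ (id6.length : Int) ∧ n ≤ (v3.length : Int)
instance (id6 : List Int) (v3 : List Int) (n : Int) : Decidable (Pre_sochdb_groupby_q8_py id6 v3 n) := by unfold Pre_sochdb_groupby_q8_py; infer_instance
def pvWitness_sochdb_groupby_q8_py : List Int × List Int × Int := ([1, 1, 2], [5, 6, 7], 3)

def Spec_sochdb_groupby_q8_py (id6 : List Int) (v3 : List Int) (n : Int) (out : Int × Int) : Prop := out = sochdb_groupby_q8_py_alt id6 v3 n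
instance (id6 : List Int) (v3 : List Int) (n : Int) (out : Int × Int) : Decidable (Spec_sochdb_groupby_q8_py id6 v3 n out) := by unfold Spec_sochdb_groupby_q8_py; infer_instance

-- ===== CLAIM (what is proved, stated in full; the proofs are below) =====
def Claim_equal_sochdb_groupby_q8_py : Prop := ∀ (id6 : List Int) (v3 : List Int) (n : Int), Dom_sochdb_groupby_q8_py id6 v3 n → Pre_sochdb_groupby_q8_py id6 v3 n → Spec_sochdb_groupby_q8_py id6 v3 n (sochdb_groupby_q8_py id6 v3 n)
-- ===== LEMMAS AND PROOFS =====

-- length of A's per-key list after c occurrences of the key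
def pvLenOf (c : Nat) : Nat := if c ≤ 3 then c else if c % 2 = 0 then 2 else 3

lemma pvLenOf_succ (c : Nat) :
    pvLenOf (c + 1) = if 3 < pvLenOf c + 1 then 2 else pvLenOf c + 1 := by
  unfold pvLenOf; split_ifs <;> omega

lemma pvMin_lenOf (c : Nat) :
    min ((pvLenOf c : Int)) 2 = min ((c : Int)) 2 := by
  unfold pvLenOf; split_ifs <;> push_cast <;> omega

lemma pvStepA_inv (h : List Int) (d : PySem.Dict Int (List Int)) (k v : Int)
    (hk : d.keys = PySem.Set.ofList h)
    (hl : ∀ x : Int, (d.getD x []).length = pvLenOf (h.count x)) :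
    (pvStepA d k v).keys = PySem.Set.ofList (h ++ [k]) ∧
    ∀ x : Int, ((pvStepA d k v).getD x []).length = pvLenOf ((h ++ [k]).count x) := by
  by_cases hc : d.contains k = true
  · have hkh : k ∈ h := (PySem.Set.mem_ofList h k).mp
      (hk ▸ (PySem.Dict.contains_iff_mem_keys d k).mp hc)
    have hstep : pvStepA d k v = d.insert k
        (if 3 < (d.getD k [] ++ [v]).length
         then (PySem.List.sorted (d.getD k [] ++ [v]) (fun x => x) true).take 2
         else d.getD k [] ++ [v]) := by
      simp [pvStepA, hc]
    rw [hstep]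
    constructor
    · rw [PySem.Dict.keys_insert_of_contains d _ hc, hk,
        PySem.Set.ofList_append_singleton,
        PySem.Set.add_of_mem ((PySem.Set.mem_ofList h k).mpr hkh)]
    · intro x
      by_cases hx : x = k
      · subst hx
        rw [PySem.Dict.getD_insert_self]
        have hcnt : (h ++ [x]).count x = h.count x + 1 := by
          simp [List.count_append]
        rw [hcnt, pvLenOf_succ, ← hl x]
        have hlen : (d.getD x [] ++ [v]).length = (d.getD x []).length + 1 := by simp
        rw [hlen]
        split_ifs with h1
        · rw [List.length_take, PySem.List.length_sorted, hlen]
          omega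
        · exact hlen
      · rw [PySem.Dict.getD_insert_of_ne (k := k) (k' := x) d _ _ hx, hl x]
        have hcnt : (h ++ [k]).count x = h.count x := by
          have : (k == x) = false := by
            simp only [beq_eq_false_iff_ne]
            exact fun hh => hx hh.symm
          simp [List.count_append, List.count_singleton, this]
        rw [hcnt]
  · have hc' : d.contains k = false := by simpa using hc
    have hkh : k ∉ h := fun hmem => hc
      ((PySem.Dict.contains_iff_mem_keys d k).mpr
        (hk ▸ (PySem.Set.mem_ofList h k).mpr hmem))
    have hcnt0 : h.count k = 0 := List.count_eq_zero.mpr hkh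
    have hstep : pvStepA d k v = d.insert k [v] := by
      simp [pvStepA, hc', PySem.Dict.getD_insert_self, PySem.Dict.insert_insert_self]
    rw [hstep]
    constructor
    · rw [PySem.Dict.keys_insert_of_not_contains d _ hc', hk,
        PySem.Set.ofList_append_singleton,
        PySem.Set.add_of_not_mem (fun hmem => hkh ((PySem.Set.mem_ofList h k).mp hmem))]
    · intro x
      by_cases hx : x = k
      · subst hx
        rw [PySem.Dict.getD_insert_self]
        simp [List.count_append, hcnt0, pvLenOf]
      · rw [PySem.Dict.getD_insert_of_ne (k := k) (k' := x) d _ _ hx, hl x]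
        have hcnt : (h ++ [k]).count x = h.count x := by
          have : (k == x) = false := by
            simp only [beq_eq_false_iff_ne]
            exact fun hh => hx hh.symm
          simp [List.count_append, List.count_singleton, this]
        rw [hcnt]

lemma pvFoldA_inv (id6 v3 : List Int) (j : Nat) (hj : j ≤ id6.length) :
    ((PySem.List.pyRange 0 (j : Int) 1).foldl
        (fun m i => pvStepA m (PySem.List.pyGetD id6 i 0) (PySem.List.pyGetD v3 i 0))
        PySem.Dict.empty).keys = PySem.Set.ofList (id6.take j) ∧
    ∀ x : Int, (((PySem.List.pyRange 0 (j : Int) 1).foldl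
        (fun m i => pvStepA m (PySem.List.pyGetD id6 i 0) (PySem.List.pyGetD v3 i 0))
        PySem.Dict.empty).getD x []).length = pvLenOf ((id6.take j).count x) := by
  induction j with
  | zero =>
    simp [PySem.List.pyRange_one_eq_nil (le_refl (0 : Int)), pvLenOf,
      PySem.Dict.keys_empty, PySem.Dict.getD_empty]
  | succ j ih =>
    have hjlt : j < id6.length := hj
    obtain ⟨ihk, ihl⟩ := ih (Nat.le_of_succ_le hj)
    have hcast : ((j + 1 : Nat) : Int) = (j : Int) + 1 := by push_cast; ring
    have htake : id6.take (j + 1) = id6.take j ++ [id6[j]] := by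
      rw [List.take_add_one, List.getElem?_eq_getElem hjlt]
      rfl
    rw [hcast, PySem.List.pyRange_one_succ_right (Int.natCast_nonneg j),
      List.foldl_append, List.foldl_cons, List.foldl_nil, htake]
    have hkey : PySem.List.pyGetD id6 ((j : Nat) : Int) 0 = id6[j] := by
      rw [PySem.List.pyGetD_natCast, List.getD_eq_getElem id6 0 hjlt]
    rw [hkey]
    exact pvStepA_inv (id6.take j) _ _ _ ihk ihl

-- ===== VERDICT (by name: the statement is the Claim_ definition above) =====
theorem sochdb_groupby_q8_py_spec : Claim_equal_sochdb_groupby_q8_py := by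
  intro id6 v3 n _ hpre
  obtain ⟨h1, _h2⟩ : n ≤ (id6.length : Int) ∧ n ≤ (v3.length : Int) := hpre
  unfold Spec_sochdb_groupby_q8_py sochdb_groupby_q8_py sochdb_groupby_q8_py_alt
  dsimp only
  have hj : n.toNat ≤ id6.length := by omega
  have hrange : PySem.List.pyRange 0 n 1 = PySem.List.pyRange 0 ((n.toNat : Nat) : Int) 1 := by
    by_cases h : 0 ≤ n
    · rw [Int.toNat_of_nonneg h]
    · rw [PySem.List.pyRange_one_eq_nil (by omega),
        PySem.List.pyRange_one_eq_nil (by omega)]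
  have hslice : PySem.List.slice id6 none (some (max 0 n)) = id6.take n.toNat := by
    rw [PySem.List.slice_to id6 (le_max_left 0 n)]
    congr 1
    omega
  rw [hrange, hslice]
  obtain ⟨hkeys, hlens⟩ := pvFoldA_inv id6 v3 n.toNat hj
  rw [PySem.Dict.foldl_insert_getD_add_one_eq_counter]
  simp only [Prod.mk.injEq]
  refine ⟨?_, trivial⟩
  rw [PySem.Dict.values_eq_map_keys _
      (hkeys ▸ PySem.Set.nodup_ofList (id6.take n.toNat)) ([] : List Int), hkeys]
  rw [PySem.Dict.values_eq_map_keys _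
      (PySem.Dict.nodup_keys_counter (id6.take n.toNat)) (0 : Int),
    PySem.Dict.keys_counter]
  rw [List.foldl_map, List.foldl_map]
  apply PySem.List.foldl_congr_mem
  intro acc x _
  rw [hlens x, PySem.Dict.getD_counter, pvMin_lenOf]
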